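-- pv_equiv track=rewrite | github.com/Manavarya09/CC-assingment-2 | parser.py | select_statements
-- ===== SOURCE A (Python) =====
-- def select_statements(statement_infos, choice):
--     text = choice.strip().lower()
--     if not text:
--         return [statement_infos[0]]
--
--     if text in ("all", "*"):
--         return statement_infos
--
--     parts = [p.strip() for p in text.split(",") if p.strip()]
--     if not parts:
--         return None
--
--     selected = []
--     seen_indexes = set()
--
--     for part in parts:
--         if not part.isdigit():
--             return None
--
--         value = int(part)
--         by_line = [info for info in statement_infos if info["line"] == value]
--
--         if by_line:
--             for info in by_line:
--                 if info["index"] not in seen_indexes: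
--                     selected.append(info)
--                     seen_indexes.add(info["index"])
--             continue
--
--         if 1 <= value <= len(statement_infos):
--             info = statement_infos[value - 1]
--             if info["index"] not in seen_indexes:
--                 selected.append(info)
--                 seen_indexes.add(info["index"])
--             continue
--
--         return None
--
--     return selected
-- ===== SOURCE B (Python) =====
-- def select_statements(statement_infos, choice):
--     text = choice.strip().lower()
--     if not text:
--         return [statement_infos[0]]
--
--     if text in ("all", "*"):
--         return statement_infos
--
--     parts = [p.strip() for p in text.split(",") if p.strip()]
--     if not parts:
--         return None
--
--     # validate and convert all parts up front
--     values = []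
--     for part in parts:
--         if not part.isdigit():
--             return None
--         values.append(int(part))
--
--     # one pass over statement_infos: group the infos by their line number
--     by_line = {}
--     for info in statement_infos:
--         by_line.setdefault(info["line"], []).append(info)
--
--     n = len(statement_infos)
--     selected = []
--     seen = set()
--     for value in values:
--         if value in by_line:
--             group = by_line[value]
--         elif 1 <= value <= n:
--             group = [statement_infos[value - 1]]
--         else:
--             return None
--         for info in group:
--             if info["index"] not in seen:
--                 selected.append(info)
--                 seen.add(info["index"])
--     return selected
-- ===== Notes on version B (the rewrite author's own statement) =====
-- stated objective: alternative
-- what changed: B validates all parts up front, then builds a line->infos dictionary in one pass over statement_infos so each requested part is answered by a dictionary lookup instead of A's full filter scan of statement_infos per part (O(p*n) scans become O(n+p) in principle; a timing run's inputs have few parts, so no measured speedup is claimed).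
import Mathlib
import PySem

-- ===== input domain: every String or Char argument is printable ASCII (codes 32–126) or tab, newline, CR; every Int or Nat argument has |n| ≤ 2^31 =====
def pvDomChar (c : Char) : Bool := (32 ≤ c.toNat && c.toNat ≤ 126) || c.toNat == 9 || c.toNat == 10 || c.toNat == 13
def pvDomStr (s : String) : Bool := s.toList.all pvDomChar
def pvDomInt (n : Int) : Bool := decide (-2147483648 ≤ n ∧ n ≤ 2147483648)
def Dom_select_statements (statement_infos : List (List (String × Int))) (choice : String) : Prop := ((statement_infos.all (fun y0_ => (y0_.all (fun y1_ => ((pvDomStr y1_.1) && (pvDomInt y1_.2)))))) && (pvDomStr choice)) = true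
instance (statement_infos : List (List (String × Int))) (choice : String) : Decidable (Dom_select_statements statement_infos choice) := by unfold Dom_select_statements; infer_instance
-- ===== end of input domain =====

-- B validates the parts up front and answers each one from a line→infos dictionary built once, instead of
-- A's per-part filter scan; equivalence is proved on Pre_ (inputs where A raises no KeyError/IndexError).

-- ===== PORT A =====
-- info["line"] / info["index"]; the default 0 is only reachable outside Pre_ (Python raises KeyError there)
def pvLine (info : List (String × Int)) : Int := (PySem.Dict.mk info).getD "line" 0
def pvIndex (info : List (String × Int)) : Int := (PySem.Dict.mk info).getD "index" 0

-- the shared inner dedup step: 'if info["index"] not in seen: selected.append(info); seen.add(info["index"])'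
def pvTake (st : List (List (String × Int)) × PySem.Set Int) (info : List (String × Int)) :
    List (List (String × Int)) × PySem.Set Int :=
  if PySem.Set.contains st.2 (pvIndex info) then st
  else (st.1 ++ [info], PySem.Set.add st.2 (pvIndex info))

-- 'parts = [p.strip() for p in text.split(",") if p.strip()]' (identical in A and B)
def pvParts (text : String) : List String :=
  (((PySem.Str.split? text ",").getD []).map PySem.Str.strip).filter (fun q => q ≠ "")

-- A's 'for part in parts' loop, carrying (selected, seen_indexes)
def selLoopA (si : List (List (String × Int))) :
    List String → List (List (String × Int)) × PySem.Set Int → Option (List (List (String × Int)))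
  | [], st => some st.1
  | p :: rest, st =>
    if ¬ PySem.Str.strIsdigit p then none
    else
      let v := (PySem.Int.ofStr? p).getD 0
      let byLine := si.filter (fun info => pvLine info == v)
      if byLine ≠ [] then
        selLoopA si rest (byLine.foldl pvTake st)
      else if 1 ≤ v ∧ v ≤ (si.length : Int) then
        selLoopA si rest (pvTake st ((PySem.List.pyGet? si (v - 1)).getD []))
      else none

def select_statements (statement_infos : List (List (String × Int))) (choice : String) : Option (List (List (String × Int))) :=
  let text := PySem.Str.lower (PySem.Str.strip choice)
  if text = "" then some [(PySem.List.pyGet? statement_infos 0).getD []]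
  else if text = "all" ∨ text = "*" then some statement_infos
  else
    let parts := pvParts text
    if parts = [] then none
    else selLoopA statement_infos parts ([], PySem.Set.empty)

-- ===== PORT B =====
-- phase 1 of Source B: validate every part and convert it with int()
def selValues : List String → Option (List Int)
  | [] => some []
  | p :: rest =>
    if ¬ PySem.Str.strIsdigit p then none
    else (selValues rest).map (fun vs => (PySem.Int.ofStr? p).getD 0 :: vs)

-- 'for info in statement_infos: by_line.setdefault(info["line"], []).append(info)'
def selBuild (si : List (List (String × Int))) : PySem.Dict Int (List (List (String × Int))) :=
  si.foldl (fun d info => d.modify (pvLine info) [] (fun g => g ++ [info])) PySem.Dict.empty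

-- Source B's 'for value in values' loop: dictionary lookup, index fallback, then the dedup loop over group
def selLoopB (si : List (List (String × Int))) (m : PySem.Dict Int (List (List (String × Int)))) :
    List Int → List (List (String × Int)) × PySem.Set Int → Option (List (List (String × Int)))
  | [], st => some st.1
  | v :: rest, st =>
    if m.contains v then
      selLoopB si m rest ((m.getD v []).foldl pvTake st)
    else if 1 ≤ v ∧ v ≤ (si.length : Int) then
      selLoopB si m rest ([(PySem.List.pyGet? si (v - 1)).getD []].foldl pvTake st)
    else none

def select_statements_alt (statement_infos : List (List (String × Int))) (choice : String) : Option (List (List (String × Int))) :=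
  let text := PySem.Str.lower (PySem.Str.strip choice)
  if text = "" then some [(PySem.List.pyGet? statement_infos 0).getD []]
  else if text = "all" ∨ text = "*" then some statement_infos
  else
    let parts := pvParts text
    if parts = [] then none
    else
      match selValues parts with
      | none => none
      | some vs => selLoopB statement_infos (selBuild statement_infos) vs ([], PySem.Set.empty)

-- ===== PRECONDITION & SPEC =====
-- Pre_ excludes the inputs where A raises: an empty statement_infos with a blank choice (IndexError), and a
-- digit-leading choice over infos missing a "line"/"index" key (KeyError); requiring both keys on every info
-- is slightly conservative — it also excludes rare inputs where only an unselected info lacks "index",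
-- on which A returns normally and B agrees.
def Pre_select_statements (statement_infos : List (List (String × Int))) (choice : String) : Prop :=
  (PySem.Str.lower (PySem.Str.strip choice) = "" → statement_infos ≠ []) ∧
  ((PySem.Str.lower (PySem.Str.strip choice) ≠ "" ∧ PySem.Str.lower (PySem.Str.strip choice) ≠ "all" ∧
      PySem.Str.lower (PySem.Str.strip choice) ≠ "*" ∧
      (∃ p ∈ (pvParts (PySem.Str.lower (PySem.Str.strip choice))).take 1, PySem.Str.strIsdigit p = true)) →
    ∀ info ∈ statement_infos,
      (PySem.Dict.mk info).contains "line" = true ∧ (PySem.Dict.mk info).contains "index" = true)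
instance (statement_infos : List (List (String × Int))) (choice : String) : Decidable (Pre_select_statements statement_infos choice) := by unfold Pre_select_statements; infer_instance

def pvWitness_select_statements : (List (List (String × Int))) × String :=
  ([[("line", 1), ("index", 0)], [("line", 3), ("index", 1)]], "3, 1")

def Spec_select_statements (statement_infos : List (List (String × Int))) (choice : String) (out : Option (List (List (String × Int)))) : Prop := out = select_statements_alt statement_infos choice
instance (statement_infos : List (List (String × Int))) (choice : String) (out : Option (List (List (String × Int)))) : Decidable (Spec_select_statements statement_infos choice out) := by unfold Spec_select_statements; infer_instance

-- ===== CLAIM (what is proved, stated in full; the proofs are below) =====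
def Claim_equal_select_statements : Prop := ∀ (statement_infos : List (List (String × Int))) (choice : String), Dom_select_statements statement_infos choice → Pre_select_statements statement_infos choice → Spec_select_statements statement_infos choice (select_statements statement_infos choice)

-- ===== LEMMAS AND PROOFS =====

-- the dictionary built by B groups exactly what A's per-part filter recomputes
theorem getD_selBuild_aux (si : List (List (String × Int))) (v : Int)
    (d : PySem.Dict Int (List (List (String × Int)))) :
    (si.foldl (fun d info => d.modify (pvLine info) [] (fun g => g ++ [info])) d).getD v []
      = d.getD v [] ++ si.filter (fun info => pvLine info == v) := by
  induction si generalizing d with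
  | nil => simp
  | cons info rest ih =>
    simp only [List.foldl_cons, ih, List.filter_cons, PySem.Dict.getD_modify]
    by_cases h : v = pvLine info
    · rw [if_pos h, if_pos (by simp [h]), h]
      simp only [List.append_assoc, List.singleton_append]
    · rw [if_neg h, if_neg (by simp [beq_iff_eq]; exact fun e => h e.symm)]

theorem getD_selBuild (si : List (List (String × Int))) (v : Int) :
    (selBuild si).getD v [] = si.filter (fun info => pvLine info == v) := by
  unfold selBuild; rw [getD_selBuild_aux]; simp

theorem contains_selBuild_aux (si : List (List (String × Int))) (v : Int)
    (d : PySem.Dict Int (List (List (String × Int)))) :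
    (si.foldl (fun d info => d.modify (pvLine info) [] (fun g => g ++ [info])) d).contains v
      = (d.contains v || si.any (fun info => pvLine info == v)) := by
  induction si generalizing d with
  | nil => simp
  | cons info rest ih =>
    simp only [List.foldl_cons, List.any_cons, ih, PySem.Dict.contains_modify]
    have hbe : (v == pvLine info) = (pvLine info == v) := by simp [eq_comm]
    rw [hbe, Bool.or_assoc, Bool.or_left_comm]

theorem contains_selBuild (si : List (List (String × Int))) (v : Int) :
    (selBuild si).contains v = si.any (fun info => pvLine info == v) := by
  unfold selBuild; rw [contains_selBuild_aux]; simp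

-- A's loop over the parts equals B's validate-then-lookup phases
theorem loopA_eq_loopB (si : List (List (String × Int))) (parts : List String)
    (st : List (List (String × Int)) × PySem.Set Int) :
    selLoopA si parts st =
      (match selValues parts with
       | none => none
       | some vs => selLoopB si (selBuild si) vs st) := by
  induction parts generalizing st with
  | nil => rfl
  | cons p rest ih =>
    show (if ¬ PySem.Str.strIsdigit p then none
          else
            let v := (PySem.Int.ofStr? p).getD 0
            let byLine := si.filter (fun info => pvLine info == v)
            if byLine ≠ [] then
              selLoopA si rest (byLine.foldl pvTake st)
            else if 1 ≤ v ∧ v ≤ (si.length : Int) then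
              selLoopA si rest (pvTake st ((PySem.List.pyGet? si (v - 1)).getD []))
            else none)
        = (match
             (if ¬ PySem.Str.strIsdigit p then none
              else (selValues rest).map (fun vs => (PySem.Int.ofStr? p).getD 0 :: vs)) with
           | none => none
           | some vs => selLoopB si (selBuild si) vs st)
    by_cases hd : PySem.Str.strIsdigit p
    · rw [if_neg (not_not_intro hd), if_neg (not_not_intro hd)]
      simp only []
      set v := (PySem.Int.ofStr? p).getD 0 with hvdef
      rcases hv : selValues rest with _ | vs
      · -- validation fails later: both sides end in none
        simp only [Option.map_none]
        by_cases hf : si.filter (fun info => pvLine info == v) ≠ []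
        · rw [if_pos hf, ih, hv]
        · rw [if_neg hf]
          by_cases hr : 1 ≤ v ∧ v ≤ (si.length : Int)
          · rw [if_pos hr, ih, hv]
          · rw [if_neg hr]
      · simp only [Option.map_some]
        show _ = selLoopB si (selBuild si) (v :: vs) st
        rw [selLoopB]
        by_cases hf : si.filter (fun info => pvLine info == v) = []
        · have hc : (selBuild si).contains v = false := by
            rw [contains_selBuild]
            simpa [List.filter_eq_nil_iff, List.any_eq_true] using hf
          rw [if_neg (show ¬ ((selBuild si).contains v = true) by simp [hc]),
            if_neg (show ¬ (si.filter (fun info => pvLine info == v) ≠ []) by simp [hf])]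
          by_cases hr : 1 ≤ v ∧ v ≤ (si.length : Int)
          · rw [if_pos hr, if_pos hr, ih, hv]
            simp only [List.foldl_cons, List.foldl_nil]
          · rw [if_neg hr, if_neg hr]
        · have hc : (selBuild si).contains v = true := by
            rw [contains_selBuild]
            rcases List.exists_mem_of_ne_nil _ hf with ⟨info, hmem⟩
            rcases List.mem_filter.mp hmem with ⟨h1, h2⟩
            exact List.any_eq_true.mpr ⟨info, h1, h2⟩
          rw [if_pos hf, if_pos (show (selBuild si).contains v = true from hc),
            getD_selBuild, ih, hv]
    · rw [if_pos hd, if_pos hd]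

-- ===== VERDICT (by name: the statement is the Claim_ definition above) =====
set_option maxHeartbeats 1000000 in
theorem select_statements_spec : Claim_equal_select_statements := by
  intro si choice _ _
  unfold Spec_select_statements
  simp only [select_statements, select_statements_alt]
  by_cases h1 : PySem.Str.lower (PySem.Str.strip choice) = ""
  · rw [if_pos h1, if_pos h1]
  · rw [if_neg h1, if_neg h1]
    by_cases h2 : PySem.Str.lower (PySem.Str.strip choice) = "all" ∨
        PySem.Str.lower (PySem.Str.strip choice) = "*"
    · rw [if_pos h2, if_pos h2]
    · rw [if_neg h2, if_neg h2]
      by_cases h3 : pvParts (PySem.Str.lower (PySem.Str.strip choice)) = []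
      · rw [if_pos h3, if_pos h3]
      · rw [if_neg h3, if_neg h3]
        exact loopA_eq_loopB si (pvParts (PySem.Str.lower (PySem.Str.strip choice))) ([], PySem.Set.empty)
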